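-- pv_equiv track=rewrite | github.com/AllanSaleh/Data-Structures-And-Algorithms | time-complexity.py | double_split
-- ===== SOURCE A (Python) =====
-- def double_split(list): #Stacked for loops is linear operation has negligible effect on time complexity
--     #And nested loops makes it quadratic
--     evens = []
--     odds = []
--
--     for num in list:
--         if num%2==0:
--             evens.append(num*2)
--
--     for num in list:
--         if num%2==1:
--             odds.append(num*2)
--
--     return(evens, odds)
-- ===== SOURCE B (Python) =====
-- def double_split(list):
--     evens = []
--     odds = []
--     for num in list:
--         (evens if num % 2 == 0 else odds).append(num * 2)
--     return (evens, odds)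
-- ===== Notes on version B (the rewrite author's own statement) =====
-- stated objective: simpler
-- what changed: Replaced A's two separate scans of the input (one collecting doubled evens, one collecting doubled odds) with a single pass that routes each doubled element into evens or odds by parity.
import Mathlib
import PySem

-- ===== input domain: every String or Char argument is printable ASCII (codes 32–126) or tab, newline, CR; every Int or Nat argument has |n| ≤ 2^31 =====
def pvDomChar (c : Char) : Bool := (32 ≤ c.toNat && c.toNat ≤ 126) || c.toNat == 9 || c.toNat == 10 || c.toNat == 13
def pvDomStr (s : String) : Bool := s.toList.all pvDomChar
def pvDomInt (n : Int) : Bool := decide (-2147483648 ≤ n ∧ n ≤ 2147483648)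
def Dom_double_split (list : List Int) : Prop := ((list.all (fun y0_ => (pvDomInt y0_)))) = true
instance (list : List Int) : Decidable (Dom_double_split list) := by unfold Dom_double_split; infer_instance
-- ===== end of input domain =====

-- B replaces A's two separate scans by one pass that routes each doubled element by parity (objective: simpler).

-- ===== PORT A =====
def double_split (list : List Int) : List Int × List Int :=
  let evens := list.foldl (fun acc num => if PySem.Int.mod num 2 = 0 then acc ++ [num * 2] else acc) []
  let odds := list.foldl (fun acc num => if PySem.Int.mod num 2 = 1 then acc ++ [num * 2] else acc) []
  (evens, odds)

-- ===== PORT B =====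
def double_split_alt (list : List Int) : List Int × List Int :=
  list.foldl
    (fun p num =>
      if PySem.Int.mod num 2 = 0 then (p.1 ++ [num * 2], p.2) else (p.1, p.2 ++ [num * 2]))
    ([], [])

-- ===== PRECONDITION & SPEC =====
def Spec_double_split (list : List Int) (out : List Int × List Int) : Prop := out = double_split_alt list
instance (list : List Int) (out : List Int × List Int) : Decidable (Spec_double_split list out) := by unfold Spec_double_split; infer_instance

-- ===== CLAIM (what is proved, stated in full; the proofs are below) =====
def Claim_equal_double_split : Prop := ∀ (list : List Int), Dom_double_split list → Spec_double_split list (double_split list)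

-- ===== LEMMAS AND PROOFS =====
theorem pv_mod_two (n : Int) : PySem.Int.mod n 2 = 0 ∨ PySem.Int.mod n 2 = 1 := by
  have h : PySem.Int.mod n 2 = n % 2 := PySem.Int.mod_eq_emod_of_pos (by omega)
  rw [h]; omega

theorem pv_fold_pair (l : List Int) (e o : List Int) :
    l.foldl
      (fun p num =>
        if PySem.Int.mod num 2 = 0 then (p.1 ++ [num * 2], p.2) else (p.1, p.2 ++ [num * 2]))
      (e, o)
    = (l.foldl (fun acc num => if PySem.Int.mod num 2 = 0 then acc ++ [num * 2] else acc) e,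
       l.foldl (fun acc num => if PySem.Int.mod num 2 = 1 then acc ++ [num * 2] else acc) o) := by
  induction l generalizing e o with
  | nil => rfl
  | cons x xs ih =>
    rcases pv_mod_two x with h | h
    · simp only [List.foldl_cons, h, if_true]
      rw [if_neg (by decide)]
      exact ih _ _
    · simp only [List.foldl_cons, h, if_true]
      exact ih _ _

-- ===== VERDICT (by name: the statement is the Claim_ definition above) =====
theorem double_split_spec : Claim_equal_double_split := by
  intro l _
  unfold Spec_double_split double_split double_split_alt
  rw [pv_fold_pair]
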